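-- pv_equiv track=rewrite | github.com/Kim-Young-Hoo/boj_algorithms | 백준/Gold/1062. 가르침/가르침.py | solution
-- ===== SOURCE A (Python) =====
-- from itertools import combinations
--
-- def solution(n, k, words):
--     if k < 5:
--         return 0
--
--     elif k == 26:
--         return n
--
--     alphabets = list("bdefghjklmopqrsuvwxyz")
--     combs = combinations(alphabets, k - 5)
--
--     max_cnt = 0
--
--     for comb in combs:
--         cnt = 0
--         learn = 0b10000010000100000101
--         for c in comb:
--             learn = learn | 1 << ord(c) - 97
--
--         for word in words:
--             if learn & word == word:
--                 cnt += 1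
--         max_cnt = max(cnt, max_cnt)
--
--     return max_cnt
-- ===== SOURCE B (Python) =====
-- def solution(n, k, words):
--     if k < 5:
--         return 0
--     if k == 26:
--         return n
--
--     def count(learn):
--         return sum(1 for word in words if learn & word == word)
--
--     def dfs(rest, need, learn):
--         if need == 0:
--             return count(learn)
--         if not rest:
--             return 0
--         return max(dfs(rest[1:], need - 1, learn | 1 << ord(rest[0]) - 97),
--                    dfs(rest[1:], need, learn))
--
--     return dfs("bdefghjklmopqrsuvwxyz", k - 5, 0b10000010000100000101)
-- ===== Notes on version B (the rewrite author's own statement) =====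
-- stated objective: alternative
-- what changed: Replaces the itertools.combinations materialised enumeration with a recursive choose/skip DFS over the 21 optional letters that threads the growing learned-letter bitmask through the calls and tracks the max via the recursion.
import Mathlib
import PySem

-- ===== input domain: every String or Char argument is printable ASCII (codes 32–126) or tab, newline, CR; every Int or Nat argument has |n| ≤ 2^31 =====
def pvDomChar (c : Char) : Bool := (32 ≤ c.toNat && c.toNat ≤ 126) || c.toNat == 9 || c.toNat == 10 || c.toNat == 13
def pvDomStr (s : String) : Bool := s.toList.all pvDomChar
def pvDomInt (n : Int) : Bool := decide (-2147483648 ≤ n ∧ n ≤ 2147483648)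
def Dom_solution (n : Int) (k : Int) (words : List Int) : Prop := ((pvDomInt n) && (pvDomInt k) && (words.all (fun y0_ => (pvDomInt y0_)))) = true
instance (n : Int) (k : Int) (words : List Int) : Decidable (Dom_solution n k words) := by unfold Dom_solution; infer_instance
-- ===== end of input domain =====

-- B replaces the itertools.combinations enumeration with a recursive DFS over the optional
-- letters that threads the growing learned-letter mask through the calls (objective: alternative).


-- ===== PORT A =====
-- 1 << (ord(c) - 97), shared by both ports (both Pythons write this expression)
def bitOfChar (c : Char) : Int := (1 : Int) <<< (c.toNat - 97)

-- hand port of itertools.combinations (PySem has none): lexicographic order, exact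
def combsA : List Char → Nat → List (List Char)
  | _, 0 => [[]]
  | [], _ + 1 => []
  | x :: xs, r + 1 => (combsA xs r).map (x :: ·) ++ combsA xs (r + 1)

def solution (n : Int) (k : Int) (words : List Int) : Int :=
  if k < 5 then 0
  else if k == 26 then n
  else
    let alphabets := "bdefghjklmopqrsuvwxyz".toList
    let combs := combsA alphabets (k - 5).toNat
    combs.foldl (fun max_cnt comb =>
      let learn := comb.foldl (fun learn c => PySem.Int.bor learn (bitOfChar c))
                     0b10000010000100000101
      let cnt := words.foldl (fun cnt word =>
                   if PySem.Int.band learn word == word then cnt + 1 else cnt) 0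
      max cnt max_cnt) 0

-- ===== PORT B =====
-- count(learn) = sum(1 for word in words if learn & word == word)
def cntWords (words : List Int) (learn : Int) : Int :=
  ((words.filter (fun word => PySem.Int.band learn word == word)).length : Int)

def dfsB (words : List Int) : List Char → Nat → Int → Int
  | _, 0, learn => cntWords words learn
  | [], _ + 1, _ => 0
  | x :: xs, r + 1, learn =>
      max (dfsB words xs r (PySem.Int.bor learn (bitOfChar x)))
          (dfsB words xs (r + 1) learn)

def solution_alt (n : Int) (k : Int) (words : List Int) : Int :=
  if k < 5 then 0
  else if k == 26 then n
  else dfsB words "bdefghjklmopqrsuvwxyz".toList (k - 5).toNat 0b10000010000100000101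

-- ===== PRECONDITION & SPEC =====
def Spec_solution (n : Int) (k : Int) (words : List Int) (out : Int) : Prop := out = solution_alt n k words
instance (n : Int) (k : Int) (words : List Int) (out : Int) : Decidable (Spec_solution n k words out) := by unfold Spec_solution; infer_instance

-- ===== CLAIM (what is proved, stated in full; the proofs are below) =====
def Claim_equal_solution : Prop := ∀ (n : Int) (k : Int) (words : List Int), Dom_solution n k words → Spec_solution n k words (solution n k words)

-- ===== LEMMAS AND PROOFS =====

theorem cntWords_nonneg (words : List Int) (learn : Int) : 0 ≤ cntWords words learn := by
  simp [cntWords]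

theorem foldl_cnt (words : List Int) (learn : Int) (i : Int) :
    words.foldl (fun cnt word => if PySem.Int.band learn word == word then cnt + 1 else cnt) i
      = i + cntWords words learn := by
  induction words generalizing i with
  | nil => simp [cntWords]
  | cons w ws ih =>
      simp only [List.foldl_cons, ih, cntWords, List.filter_cons]
      split
      · simp only [List.length_cons]
        push_cast
        omega
      · rfl

theorem foldl_max_nonneg {α : Type} (g : α → Int) (l : List α) (i : Int) (hi : 0 ≤ i) :
    0 ≤ l.foldl (fun m c => max (g c) m) i := by
  induction l generalizing i with
  | nil => simpa
  | cons x xs ih => exact ih _ (le_trans hi (le_max_right _ _))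

theorem foldl_max_shift {α : Type} (g : α → Int) (l : List α) (i : Int) (hi : 0 ≤ i) :
    l.foldl (fun m c => max (g c) m) i = max i (l.foldl (fun m c => max (g c) m) 0) := by
  induction l generalizing i with
  | nil => simp [max_eq_left hi]
  | cons x xs ih =>
      have h1 : 0 ≤ max (g x) i := le_trans hi (le_max_right _ _)
      have h2 : 0 ≤ max (g x) 0 := le_max_right _ _
      have hF := foldl_max_nonneg g xs 0 le_rfl
      simp only [List.foldl_cons, ih _ h1, ih _ h2]
      omega

-- DFS with threaded mask = fold of 'max of count' over the combination list
theorem dfs_eq_fold (words : List Int) (rest : List Char) (r : Nat) (learn : Int) :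
    dfsB words rest r learn
      = (combsA rest r).foldl (fun m comb =>
          max (cntWords words
                (comb.foldl (fun l c => PySem.Int.bor l (bitOfChar c)) learn)) m) 0 := by
  induction rest generalizing r learn with
  | nil =>
      cases r with
      | zero =>
          simp [dfsB, combsA, max_eq_left (cntWords_nonneg words learn)]
      | succ r => simp [dfsB, combsA]
  | cons x xs ih =>
      cases r with
      | zero =>
          simp [dfsB, combsA, max_eq_left (cntWords_nonneg words learn)]
      | succ r =>
          simp only [dfsB, combsA, List.foldl_append, List.foldl_map, List.foldl_cons, ih]
          rw [foldl_max_shift _ _ _ (foldl_max_nonneg _ _ _ le_rfl)]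

-- ===== VERDICT (by name: the statement is the Claim_ definition above) =====
theorem solution_spec : Claim_equal_solution := by
  intro n k words _
  show solution n k words = solution_alt n k words
  unfold solution solution_alt
  split
  · rfl
  split
  · rfl
  simp only [foldl_cnt, zero_add, dfs_eq_fold]
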